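-- pv_equiv track=rewrite | github.com/pypi-data/pypi-mirror-260 | packages/magicbits/magicbits-1.0.1-py3-none-any.whl/magicbits/consecutive_number.py | check_consecuitve_1s
-- ===== SOURCE A (Python) =====
-- def check_consecuitve_1s(input_string):
--     state = 0
--     for bit in input_string:
--         if state == 0 and bit == '1':
--             state = 1
--         elif state == 1 and bit == '1':
--             state = 2
--         elif state == 2 and bit == '1':
--             state = 3
--             break
--         else:
--             state = 0  # Reset state to 0 if the bit is : 0
--     return state == 3
-- ===== SOURCE B (Python) =====
-- def check_consecuitve_1s(input_string):
--     # Run-length decomposition: scan maximal runs of equal characters,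
--     # return True iff some run of '1' has length >= 3.
--     chars = list(input_string)
--     n = len(chars)
--     i = 0
--     while i < n:
--         j = i
--         while j < n and chars[j] == chars[i]:
--             j += 1
--         if chars[i] == '1' and j - i >= 3:
--             return True
--         i = j
--     return False
-- ===== Notes on version B (the rewrite author's own statement) =====
-- stated objective: alternative
-- what changed: Replaced the explicit 4-state counter automaton with a run-length decomposition: scan maximal runs of equal characters and return True iff some run of the target digit has length at least three.
import Mathlib
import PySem

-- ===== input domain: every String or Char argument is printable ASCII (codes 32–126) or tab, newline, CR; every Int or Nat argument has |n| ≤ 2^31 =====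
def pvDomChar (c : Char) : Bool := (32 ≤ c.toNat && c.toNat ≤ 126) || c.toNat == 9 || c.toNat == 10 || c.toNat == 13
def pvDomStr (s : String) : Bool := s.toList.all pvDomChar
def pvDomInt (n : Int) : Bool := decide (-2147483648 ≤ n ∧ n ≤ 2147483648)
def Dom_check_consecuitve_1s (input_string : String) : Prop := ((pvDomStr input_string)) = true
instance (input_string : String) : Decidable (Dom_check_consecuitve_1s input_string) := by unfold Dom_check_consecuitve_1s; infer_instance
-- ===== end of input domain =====

-- B replaces A's 4-state counter automaton with a run-length decomposition (alternative, same cost).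


-- ===== PORT A =====
-- state machine over the characters; 'break' when state reaches 3 is the early 'true'
def goA : List Char → Nat → Bool
  | [], st => st == 3
  | c :: cs, st =>
    if st == 0 && c == '1' then goA cs 1
    else if st == 1 && c == '1' then goA cs 2
    else if st == 2 && c == '1' then true
    else goA cs 0

def check_consecuitve_1s (input_string : String) : Bool :=
  goA input_string.toList 0

-- ===== PORT B =====
-- peel the maximal run of the head character (inner while loop = span), test it, recurse on the rest
def goB : List Char → Bool
  | [] => false
  | c :: cs =>
    let run := cs.takeWhile (· == c)
    let rest := cs.dropWhile (· == c)
    if c == '1' && run.length + 1 ≥ 3 then true else goB rest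
termination_by l => l.length
decreasing_by
  calc (List.dropWhile (· == c) cs).length ≤ cs.length := List.length_dropWhile_le _ _
    _ < (c :: cs).length := by simp

def check_consecuitve_1s_alt (input_string : String) : Bool :=
  goB input_string.toList

-- ===== PRECONDITION & SPEC =====
def Spec_check_consecuitve_1s (input_string : String) (out : Bool) : Prop := out = check_consecuitve_1s_alt input_string
instance (input_string : String) (out : Bool) : Decidable (Spec_check_consecuitve_1s input_string out) := by unfold Spec_check_consecuitve_1s; infer_instance

-- ===== CLAIM (what is proved, stated in full; the proofs are below) =====
def Claim_equal_check_consecuitve_1s : Prop := ∀ (input_string : String), Dom_check_consecuitve_1s input_string → Spec_check_consecuitve_1s input_string (check_consecuitve_1s input_string)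

-- ===== LEMMAS AND PROOFS =====

-- small-step facts about the automaton
theorem goA_nil (st : Nat) : goA [] st = (st == 3) := rfl
theorem goA_step1 (l : List Char) : goA ('1' :: l) 0 = goA l 1 := by simp [goA]
theorem goA_step2 (l : List Char) : goA ('1' :: l) 1 = goA l 2 := by simp [goA]
theorem goA_step3 (l : List Char) : goA ('1' :: l) 2 = true := by simp [goA]
theorem goA_reset1 (c : Char) (l : List Char) (st : Nat) (hc : c ≠ '1') :
    goA (c :: l) st = goA l 0 := by simp [goA, hc]

-- one-step unfolding of the run-peeling recursion
theorem goB_cons (c : Char) (cs : List Char) :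
    goB (c :: cs) =
      if c == '1' && ((cs.takeWhile (· == c)).length + 1 ≥ 3 : Bool) then true
      else goB (cs.dropWhile (· == c)) := by
  rw [goB]

-- a block of non-'1' characters resets the automaton: it ends in state 0
theorem goA_reset (xs rest : List Char) (h : ∀ x ∈ xs, x ≠ '1') :
    goA (xs ++ rest) 0 = goA rest 0 := by
  induction xs with
  | nil => rfl
  | cons x xs ih =>
    have hx : x ≠ '1' := h x (List.mem_cons_self)
    rw [List.cons_append, goA_reset1 x _ 0 hx]
    exact ih (fun y hy => h y (List.mem_cons_of_mem _ hy))

-- if the next character is not '1' (or the list is empty), states 0/1/2 behave alike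
theorem goA_state_irrel (rest : List Char) (st : Nat) (hst : st ≤ 2)
    (h : rest.head? ≠ some '1') : goA rest st = goA rest 0 := by
  cases rest with
  | nil =>
    rw [goA_nil, goA_nil]
    interval_cases st <;> rfl
  | cons r rs =>
    have hr : r ≠ '1' := by simpa using h
    rw [goA_reset1 r rs st hr, goA_reset1 r rs 0 hr]

theorem goA_eq_goB : ∀ (n : Nat) (l : List Char), l.length ≤ n → goA l 0 = goB l := by
  intro n
  induction n with
  | zero =>
    intro l hl
    have : l = [] := List.eq_nil_of_length_eq_zero (Nat.le_zero.mp hl)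
    subst this; simp [goA_nil, goB]
  | succ n ih =>
    intro l hl
    cases l with
    | nil => simp [goA_nil, goB]
    | cons c cs =>
      have hsplit : cs.takeWhile (· == c) ++ cs.dropWhile (· == c) = cs :=
        List.takeWhile_append_dropWhile
      have hrest_len : (cs.dropWhile (· == c)).length ≤ n := by
        have := List.length_dropWhile_le (· == c) cs
        have hcs : cs.length ≤ n := by simpa using Nat.le_of_succ_le_succ hl
        omega
      have hrest_head : (cs.dropWhile (· == c)).head? ≠ some c := by
        intro hc
        have := List.head?_dropWhile_not (· == c) cs
        rw [hc] at this
        simp at this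
      rw [goB_cons]
      by_cases hc1 : c = '1'
      · subst hc1
        have hrun : ∀ x ∈ cs.takeWhile (· == '1'), x = '1' := by
          intro x hx
          have := List.mem_takeWhile_imp hx
          simpa using this
        rcases hrunshape : cs.takeWhile (· == '1') with _ | ⟨a, _ | ⟨b, run2⟩⟩
        · -- run empty: cs = rest
          have hcs_eq : cs.dropWhile (· == '1') = cs := by
            simpa [hrunshape] using hsplit
          rw [if_neg (by simp)]
          rw [hcs_eq] at hrest_head
          rw [goA_step1, hcs_eq, goA_state_irrel cs 1 (by omega) hrest_head]
          exact ih cs (by simpa using Nat.le_of_succ_le_succ hl)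
        · -- run = ['1']: exactly two '1's then a non-'1' (or end)
          have ha : a = '1' := hrun a (by rw [hrunshape]; simp)
          subst ha
          have hcs_eq : cs = '1' :: cs.dropWhile (· == '1') := by
            conv_lhs => rw [← hsplit]
            rw [hrunshape]; rfl
          rw [if_neg (by simp)]
          conv_lhs => rw [hcs_eq]
          rw [goA_step1, goA_step2, goA_state_irrel _ 2 (by omega) hrest_head]
          exact ih _ hrest_len
        · -- run length ≥ 2: three '1's in a row, A fires
          have ha : a = '1' := hrun a (by rw [hrunshape]; simp)
          have hb : b = '1' := hrun b (by rw [hrunshape]; simp)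
          subst ha; subst hb
          have hcs_eq : cs = '1' :: '1' :: (run2 ++ cs.dropWhile (· == '1')) := by
            conv_lhs => rw [← hsplit]
            rw [hrunshape]; rfl
          rw [if_pos (by simp)]
          conv_lhs => rw [hcs_eq]
          rw [goA_step1, goA_step2, goA_step3]
      · -- head ≠ '1': the whole leading run resets the automaton
        have hrun : ∀ x ∈ cs.takeWhile (· == c), x ≠ '1' := by
          intro x hx
          have := List.mem_takeWhile_imp hx
          simp at this
          rw [this]; exact hc1
        have hcne : (c == '1') = false := by simpa using hc1
        rw [hcne]
        simp only [Bool.false_and, if_neg Bool.false_ne_true]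
        rw [goA_reset1 c cs 0 hc1]
        conv_lhs => rw [← hsplit]
        rw [goA_reset _ _ hrun]
        exact ih _ hrest_len

-- ===== VERDICT (by name: the statement is the Claim_ definition above) =====
theorem check_consecuitve_1s_spec : Claim_equal_check_consecuitve_1s := by
  intro s _
  unfold Spec_check_consecuitve_1s check_consecuitve_1s check_consecuitve_1s_alt
  exact goA_eq_goB s.toList.length s.toList le_rfl
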